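-- pv_equiv track=rewrite | github.com/Ji-Hwan-Jung/coding-test | level1/모의고사.py | solution
-- ===== SOURCE A (Python) =====
-- def solution(answers):
--     one = [1,2,3,4,5]
--     two = [2,1,2,3,2,4,2,5]
--     three = [3,3,1,1,2,2,4,4,5,5]
--     table = [0,0,0]
--
--     for i,e in enumerate(answers):
--         if one[i%len(one)] == e:
--             table[0] += 1
--         if two[i%len(two)] == e:
--             table[1] += 1
--         if three[i%len(three)] == e:
--             table[2] += 1
--
--     return [i+1 for i,e in enumerate(table) if max(table) == e ]
-- ===== SOURCE B (Python) =====
-- def solution(answers):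
--     # All three guessing patterns repeat with period dividing 40 (lcm of 5, 8, 10),
--     # so a histogram of (position mod 40, answer) pairs determines every score.
--     patterns = [[1, 2, 3, 4, 5],
--                 [2, 1, 2, 3, 2, 4, 2, 5],
--                 [3, 3, 1, 1, 2, 2, 4, 4, 5, 5]]
--     cnt = {}
--     for i, e in enumerate(answers):
--         k = (i % 40, e)
--         cnt[k] = cnt.get(k, 0) + 1
--     scores = [sum(cnt.get((r, p[r % len(p)]), 0) for r in range(40)) for p in patterns]
--     best = max(scores)
--     return [k + 1 for k, s in enumerate(scores) if s == best]
-- ===== Notes on version B (the rewrite author's own statement) =====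
-- stated objective: alternative
-- what changed: Instead of A's fused per-element scoring loop, B builds a single histogram dict of (index mod 40, answer) pairs (40 = lcm of the pattern periods) in one pass and then derives each pattern's score from 40 dictionary lookups, never rescanning answers.
import Mathlib
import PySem

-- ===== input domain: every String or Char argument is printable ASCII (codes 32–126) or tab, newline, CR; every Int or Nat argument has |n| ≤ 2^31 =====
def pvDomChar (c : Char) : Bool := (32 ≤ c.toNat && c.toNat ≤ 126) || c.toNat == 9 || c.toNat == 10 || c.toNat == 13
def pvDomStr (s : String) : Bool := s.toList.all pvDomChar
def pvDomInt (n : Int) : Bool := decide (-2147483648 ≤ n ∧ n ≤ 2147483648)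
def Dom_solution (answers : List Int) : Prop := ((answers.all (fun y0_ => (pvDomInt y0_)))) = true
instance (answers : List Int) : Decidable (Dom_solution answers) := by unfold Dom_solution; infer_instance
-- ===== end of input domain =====

-- B replaces A's fused per-element scoring loop by a one-pass histogram dict of
-- (index mod 40, answer) pairs (40 = lcm of the three pattern periods), from which
-- each pattern's score is read off by 40 dictionary lookups; objective: alternative.

-- ===== PORT A =====
-- literal transliteration of A: one fused pass over enumerate(answers) updating table[0..2]
def solution (answers : List Int) : List Int :=
  let one : List Int := [1,2,3,4,5]
  let two : List Int := [2,1,2,3,2,4,2,5]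
  let three : List Int := [3,3,1,1,2,2,4,4,5,5]
  let table :=
    (PySem.List.enumerate answers 0).foldl
      (fun (t : Int × Int × Int) ie =>
        (if PySem.List.pyGet? one (PySem.Int.mod ie.1 (one.length : Int)) = some ie.2 then t.1 + 1 else t.1,
         if PySem.List.pyGet? two (PySem.Int.mod ie.1 (two.length : Int)) = some ie.2 then t.2.1 + 1 else t.2.1,
         if PySem.List.pyGet? three (PySem.Int.mod ie.1 (three.length : Int)) = some ie.2 then t.2.2 + 1 else t.2.2))
      (0, 0, 0)
  let tbl : List Int := [table.1, table.2.1, table.2.2]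
  (PySem.List.enumerate tbl 0).foldl
    (fun acc ie => if PySem.List.max? tbl (fun x => x) = some ie.2 then acc ++ [ie.1 + 1] else acc) []

-- ===== PORT B =====
def solution_alt (answers : List Int) : List Int :=
  let patterns : List (List Int) := [[1,2,3,4,5],[2,1,2,3,2,4,2,5],[3,3,1,1,2,2,4,4,5,5]]
  -- cnt[k] = cnt.get(k, 0) + 1  with  k = (i % 40, e)
  let cnt : PySem.Dict (Int × Int) Int :=
    (PySem.List.enumerate answers 0).foldl
      (fun d ie =>
        let k : Int × Int := (PySem.Int.mod ie.1 40, ie.2)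
        d.insert k (d.getD k 0 + 1))
      PySem.Dict.empty
  -- scores = [sum(cnt.get((r, p[r % len(p)]), 0) for r in range(40)) for p in patterns]
  let scores : List Int := patterns.map (fun p =>
    (PySem.List.pyRange 0 40 1).foldl
      (fun acc r => acc + cnt.getD (r, PySem.List.pyGetD p (PySem.Int.mod r (p.length : Int)) 0) 0) 0)
  let best := PySem.List.max? scores (fun x => x)
  (PySem.List.enumerate scores 0).foldl
    (fun acc ks => if some ks.2 = best then acc ++ [ks.1 + 1] else acc) []

-- ===== PRECONDITION & SPEC =====
def Spec_solution (answers : List Int) (out : List Int) : Prop := out = solution_alt answers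
instance (answers : List Int) (out : List Int) : Decidable (Spec_solution answers out) := by unfold Spec_solution; infer_instance

-- ===== CLAIM (what is proved, stated in full; the proofs are below) =====
def Claim_equal_solution : Prop := ∀ (answers : List Int), Dom_solution answers → Spec_solution answers (solution answers)

-- ===== LEMMAS AND PROOFS =====

-- a fold maintaining three independent counters is three counting folds
theorem pv_foldl_split (p q r : Int × Int → Prop) [DecidablePred p] [DecidablePred q] [DecidablePred r]
    (l : List (Int × Int)) (a b c : Int) :
    l.foldl (fun (t : Int × Int × Int) ie =>
        (if p ie then t.1 + 1 else t.1,
         if q ie then t.2.1 + 1 else t.2.1,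
         if r ie then t.2.2 + 1 else t.2.2)) (a, b, c)
      = (l.foldl (fun acc ie => if p ie then acc + 1 else acc) a,
         l.foldl (fun acc ie => if q ie then acc + 1 else acc) b,
         l.foldl (fun acc ie => if r ie then acc + 1 else acc) c) := by
  induction l generalizing a b c with
  | nil => rfl
  | cons x xs ih => simp only [List.foldl_cons]; exact ih _ _ _

-- summing a 0/1 indicator keyed by (r, g r) over a nodup index list containing m hits exactly once
theorem pv_indicator_sum (g : Int → Int) (rs : List Int) (m e : Int)
    (hnd : rs.Nodup) (hm : m ∈ rs) :
    (rs.map (fun r => if ((m, e) : Int × Int) = (r, g r) then (1 : Int) else 0)).sum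
      = if e = g m then 1 else 0 := by
  induction rs with
  | nil => cases hm
  | cons r rs ih =>
    simp only [List.map_cons, List.sum_cons]
    rcases List.mem_cons.mp hm with h | h
    · subst h
      have hz : (rs.map (fun r => if ((m, e) : Int × Int) = (r, g r) then (1 : Int) else 0)).sum = 0 := by
        apply List.sum_eq_zero
        intro x hx
        rcases List.mem_map.mp hx with ⟨r', hr', rfl⟩
        have : m ≠ r' := fun h' => (List.nodup_cons.mp hnd).1 (h' ▸ hr')
        simp [Prod.ext_iff, this]
      rw [hz]
      by_cases he : e = g m <;> simp [Prod.ext_iff, he]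
    · have hne : m ≠ r := fun h' => (List.nodup_cons.mp hnd).1 (h' ▸ h)
      rw [ih (List.nodup_cons.mp hnd).2 h]
      simp [Prod.ext_iff, hne]

-- B's histogram-lookup sum over range(40) equals A's direct match count, for any
-- pattern p whose length divides 40, over any pair list with nonnegative indices
theorem pv_hist_eq_count (p : List Int) (hL : 0 < p.length) (hdvd : ((p.length : Int)) ∣ 40)
    (l : List (Int × Int)) (hpos : ∀ ie ∈ l, 0 ≤ ie.1) :
    ((PySem.List.pyRange 0 40 1).map
        (fun r => ((l.map (fun ie => ((PySem.Int.mod ie.1 40, ie.2) : Int × Int))).count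
                    (r, PySem.List.pyGetD p (PySem.Int.mod r (p.length : Int)) 0) : Int))).sum
      = (l.countP (fun ie => decide (PySem.List.pyGet? p (PySem.Int.mod ie.1 (p.length : Int)) = some ie.2)) : Int) := by
  induction l with
  | nil => simp
  | cons ie l ih =>
    have hi : 0 ≤ ie.1 := hpos ie (by simp)
    have ihl := ih (fun x hx => hpos x (by simp [hx]))
    simp only [List.map_cons, List.count_cons, List.countP_cons, Nat.cast_add, Nat.cast_ite,
      Nat.cast_one, Nat.cast_zero]
    rw [PySem.List.sum_map_add_int, ihl]
    congr 1
    simp only [beq_iff_eq, decide_eq_true_eq]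
    rw [pv_indicator_sum (fun r => PySem.List.pyGetD p (PySem.Int.mod r (p.length : Int)) 0)
        (PySem.List.pyRange 0 40 1) (PySem.Int.mod ie.1 40) ie.2
        (by decide)
        (PySem.List.mem_pyRange_one.mpr ⟨PySem.Int.mod_nonneg ie.1 (by norm_num),
                                         PySem.Int.mod_lt ie.1 (by norm_num)⟩)]
    have hL' : (0:Int) < (p.length : Int) := by exact_mod_cast hL
    have e40 : PySem.Int.mod ie.1 40 = ie.1 % 40 := PySem.Int.mod_eq_emod_of_pos (by norm_num)
    have eL : ∀ a : Int, PySem.Int.mod a (p.length : Int) = a % (p.length : Int) :=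
      fun a => PySem.Int.mod_eq_emod_of_pos hL'
    have ecomp : ie.1 % 40 % (p.length : Int) = ie.1 % (p.length : Int) :=
      Int.emod_emod_of_dvd ie.1 hdvd
    have hj0 : 0 ≤ ie.1 % (p.length : Int) := Int.emod_nonneg ie.1 (by omega)
    have hjL : ie.1 % (p.length : Int) < (p.length : Int) := Int.emod_lt_of_pos ie.1 hL'
    rw [e40, eL, eL, ecomp]
    rw [PySem.List.pyGet?_eq_some_getElem p hj0 hjL,
        PySem.List.pyGetD_eq_getElem p 0 hj0 hjL]
    simp [eq_comm]

-- ===== VERDICT (by name: the statement is the Claim_ definition above) =====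
theorem solution_spec : Claim_equal_solution := by
  intro answers _
  have hpos : ∀ ie ∈ PySem.List.enumerate answers 0, 0 ≤ ie.1 := by
    intro ie hie
    rcases (PySem.List.mem_enumerate_iff _ _ _).mp hie with ⟨k, hk, rfl⟩
    simp
  unfold Spec_solution solution solution_alt
  simp only [List.map_cons, List.map_nil]
  rw [pv_foldl_split]
  rw [← List.foldl_map (f := fun ie : Int × Int => ((PySem.Int.mod ie.1 40, ie.2) : Int × Int))
        (g := fun (d : PySem.Dict (Int × Int) Int) k => d.insert k (d.getD k 0 + 1))]
  simp only [PySem.Dict.getD_foldl_insert_add_one, PySem.Dict.getD_empty, zero_add]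
  simp only [PySem.List.foldl_add, PySem.List.foldl_ite_add_one, zero_add]
  rw [pv_hist_eq_count [1,2,3,4,5] (by decide) (by decide) _ hpos,
      pv_hist_eq_count [2,1,2,3,2,4,2,5] (by decide) (by decide) _ hpos,
      pv_hist_eq_count [3,3,1,1,2,2,4,4,5,5] (by decide) (by decide) _ hpos]
  congr 1
  funext acc ie
  simp only [eq_comm]
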